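-- pv_equiv track=rewrite | github.com/sshen070/File_Markdown_Formatter | src/markdown_formatter_sshen070/formatingAlgorithm.py | header_end_tracker
-- ===== SOURCE A (Python) =====
-- def header_end_tracker(word_list: list[str]) -> int:
--     # If there are bullet points in the word_list --> do not make a header
--     if (bullet_tracker(word_list) != len(word_list)):
--         return 0
--
--
--     for i in range(len(word_list) - 2):
--             # If first word is upper case & the second is lower --> issue with formating
--             if (not word_list[i].islower() and not word_list[i + 1].islower() and word_list[i + 2].islower()):
--                 if (word_comparator(word_list, word_list[i + 2])):
--                     continue
--                 return i + 1
--
--     return len(word_list)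
--
-- def word_comparator(word_list: list[str], lower_case_word: str) -> bool:
--     valid_in_header = [ "a", "an", "and", "as", "at", "but", "by", "en", "for", "if", "in", "of", "on", "or", "the", "to", "v", "v.", "vs", "vs."]
--
--     for word in valid_in_header:
--         if (lower_case_word == word):
--             return True
--     return False
--
-- def bullet_tracker(word_list: list[str]) -> int:
--     for i in range(len(word_list) - 1):
--
--         # If '*' appears --> we have a list under a header list
--         if word_list[i].startswith("*"):
--             if (i == 0):
--                 return bullet_tracker(word_list[1:]) + 1
--             return i
--
--     return len(word_list)
-- ===== SOURCE B (Python) =====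
-- _VALID_IN_HEADER = frozenset({"a", "an", "and", "as", "at", "but", "by", "en", "for",
--                               "if", "in", "of", "on", "or", "the", "to", "v", "v.", "vs", "vs."})
--
--
-- def header_end_tracker(word_list: list[str]) -> int:
--     n = len(word_list)
--     # count the leading run of bullet words
--     k = 0
--     while k < n and word_list[k].startswith("*"):
--         k += 1
--     # a bullet anywhere else (the final word is never inspected) --> no header
--     if any(w.startswith("*") for w in word_list[k:n - 1]):
--         return 0
--     # first Upper,Upper,lower triple whose lower word is not a small header word
--     for i, (a, b, c) in enumerate(zip(word_list, word_list[1:], word_list[2:])):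
--         if not a.islower() and not b.islower() and c.islower() and c not in _VALID_IN_HEADER:
--             return i + 1
--     return n
-- ===== Notes on version B (the rewrite author's own statement) =====
-- stated objective: simpler
-- what changed: bullet_tracker's slice-and-recurse scan is replaced by one iterative pass (count the leading run of '*'-words, then scan the rest up to the second-to-last word), and the index-based triple loop with the helper word_comparator is replaced by a zip over adjacent word triples with a frozenset membership test.
import Mathlib
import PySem

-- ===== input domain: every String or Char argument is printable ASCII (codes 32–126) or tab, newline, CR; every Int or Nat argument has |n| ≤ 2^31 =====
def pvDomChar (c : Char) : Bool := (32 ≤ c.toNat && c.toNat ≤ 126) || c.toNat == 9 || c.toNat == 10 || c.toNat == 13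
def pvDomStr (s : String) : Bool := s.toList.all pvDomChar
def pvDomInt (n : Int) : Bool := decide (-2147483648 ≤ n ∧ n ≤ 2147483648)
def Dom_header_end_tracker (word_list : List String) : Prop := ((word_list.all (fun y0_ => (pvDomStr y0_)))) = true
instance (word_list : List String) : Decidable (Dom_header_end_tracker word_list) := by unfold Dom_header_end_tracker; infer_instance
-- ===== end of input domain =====

-- B replaces the recursive-with-slicing bullet_tracker by a single iterative pass (leading-'*' run
-- count + one scan of the rest) and the index-triple loop by a zip over adjacent word triples with a
-- set membership test; objective: simpler (no recursion on slices, no repeated indexing).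

-- Shared helper: Python's str.islower(), ported by hand (exact on the ASCII domain, where the
-- cased characters are exactly the letters: some lowercase letter and no uppercase letter).
def strIslower (s : String) : Bool :=
  s.toList.any PySem.Chars.islower && !(s.toList.any PySem.Chars.isupper)

-- ===== PORT A =====
-- word_comparator's for-loop over the literal list, early return True
def wcLoop (lower_case_word : String) : List String → Bool
  | [] => false
  | w :: rest => if lower_case_word == w then true else wcLoop lower_case_word rest

def word_comparator (_word_list : List String) (lower_case_word : String) : Bool :=
  wcLoop lower_case_word ["a", "an", "and", "as", "at", "but", "by", "en", "for", "if",
                          "in", "of", "on", "or", "the", "to", "v", "v.", "vs", "vs."]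

-- bullet_tracker's for-loop: first i in range(len-1) with word_list[i].startswith('*'), else None
def bulletFor (wl : List String) : List Int → Option Int
  | [] => none
  | i :: rest =>
    if PySem.Str.startswith (PySem.List.pyGetD wl i "") "*" then some i else bulletFor wl rest

def bullet_tracker : List String → Int
  | [] => (0 : Int)
  | w :: rest =>
    match bulletFor (w :: rest) (PySem.List.pyRange 0 (((w :: rest).length : Int) - 1) 1) with
    | some i => if i == 0 then bullet_tracker rest + 1 else i
    | none => ((w :: rest).length : Int)

-- header_end_tracker's for-loop over range(len - 2), early return i + 1
def headerFor (wl : List String) : List Int → Int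
  | [] => (wl.length : Int)
  | i :: rest =>
    if !strIslower (PySem.List.pyGetD wl i "") && !strIslower (PySem.List.pyGetD wl (i + 1) "")
        && strIslower (PySem.List.pyGetD wl (i + 2) "") then
      if word_comparator wl (PySem.List.pyGetD wl (i + 2) "") then headerFor wl rest
      else i + 1
    else headerFor wl rest

def header_end_tracker (word_list : List String) : Int :=
  if bullet_tracker word_list ≠ (word_list.length : Int) then 0
  else headerFor word_list (PySem.List.pyRange 0 ((word_list.length : Int) - 2) 1)

-- ===== PORT B =====
def validInHeader : List String :=
  ["a", "an", "and", "as", "at", "but", "by", "en", "for", "if",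
   "in", "of", "on", "or", "the", "to", "v", "v.", "vs", "vs."]

-- the while-loop counting the leading run of '*'-words
def leadingStars : List String → Nat
  | [] => 0
  | w :: rest => if PySem.Str.startswith w "*" then leadingStars rest + 1 else 0

-- the 'for i, (a, b, c) in enumerate(zip(word_list, word_list[1:], word_list[2:]))' loop
def tripleScan : List String → Int → Option Int
  | a :: b :: c :: rest, i =>
    if !strIslower a && !strIslower b && strIslower c && !(validInHeader.contains c) then
      some (i + 1)
    else tripleScan (b :: c :: rest) (i + 1)
  | _, _ => none

def header_end_tracker_alt (word_list : List String) : Int :=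
  let n : Int := word_list.length
  let k : Nat := leadingStars word_list
  if (PySem.List.slice word_list (some (k : Int)) (some (n - 1))).any
      (fun w => PySem.Str.startswith w "*") then 0
  else
    match tripleScan word_list 0 with
    | some r => r
    | none => n

-- ===== PRECONDITION & SPEC =====
def Spec_header_end_tracker (word_list : List String) (out : Int) : Prop := out = header_end_tracker_alt word_list
instance (word_list : List String) (out : Int) : Decidable (Spec_header_end_tracker word_list out) := by unfold Spec_header_end_tracker; infer_instance

-- ===== CLAIM (what is proved, stated in full; the proofs are below) =====
def Claim_equal_header_end_tracker : Prop := ∀ (word_list : List String), Dom_header_end_tracker word_list → Spec_header_end_tracker word_list (header_end_tracker word_list)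

-- ===== LEMMAS AND PROOFS =====

theorem wcLoop_eq_contains (s : String) (l : List String) : wcLoop s l = l.contains s := by
  induction l with
  | nil => rfl
  | cons w rest ih =>
    rw [List.contains_cons]
    by_cases h : s == w
    · simp [wcLoop, h]
    · simp only [wcLoop]
      rw [if_neg (by simpa using h), ih]
      simp [h]

theorem word_comparator_eq (wl : List String) (s : String) :
    word_comparator wl s = validInHeader.contains s := by
  simp only [word_comparator, validInHeader, wcLoop_eq_contains]

theorem pyGetD_of_drop (wl : List String) (a : Nat) (x : String) (t : List String)
    (h : wl.drop a = x :: t) : PySem.List.pyGetD wl (a : Int) "" = x := by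
  have h2 : (wl.drop a)[0]? = wl[a + 0]? := List.getElem?_drop
  rw [h] at h2
  simp only [List.getElem?_cons_zero, Nat.add_zero] at h2
  rw [PySem.List.pyGetD_natCast, List.getD_eq_getElem?_getD, ← h2]
  rfl

theorem drop_succ_of_drop (wl : List String) (a : Nat) (x : String) (t : List String)
    (h : wl.drop a = x :: t) : wl.drop (a + 1) = t := by
  rw [← List.tail_drop, h, List.tail_cons]

-- bulletFor over an index range is the first '*'-index of the corresponding window of the list
theorem bulletFor_window (wl : List String) (m : Nat) : ∀ (a : Nat),
    bulletFor wl (PySem.List.pyRange (a : Int) ((a : Int) + (m : Int)) 1) =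
      (((wl.drop a).take m).findIdx? (fun w => PySem.Str.startswith w "*")).map
        (fun j => ((a + j : Nat) : Int)) := by
  induction m with
  | zero =>
    intro a
    rw [PySem.List.pyRange_one_eq_nil (by omega)]
    simp [bulletFor]
  | succ m ih =>
    intro a
    rw [PySem.List.pyRange_one_cons (by omega)]
    simp only [bulletFor]
    have hca : ((a : Int) + 1) = ((a + 1 : Nat) : Int) := by push_cast; ring
    have hcb : ((a : Int) + ((m + 1 : Nat) : Int)) = ((a + 1 : Nat) : Int) + (m : Int) := by
      push_cast; ring
    rw [hcb, hca, ih (a + 1)]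
    cases hd : wl.drop a with
    | nil =>
      have h1 : PySem.List.pyGetD wl (a : Int) "" = "" := by
        have hlen : wl.length ≤ a := by
          have := List.drop_eq_nil_iff.mp hd; omega
        rw [PySem.List.pyGetD_natCast, List.getD_eq_getElem?_getD,
            List.getElem?_eq_none (by omega : wl.length ≤ a)]
        rfl
      have h2 : wl.drop (a + 1) = [] := List.drop_eq_nil_iff.mpr
        (by have := List.drop_eq_nil_iff.mp hd; omega)
      rw [h1, h2]
      rw [if_neg (by decide)]
      simp
    | cons x t =>
      rw [pyGetD_of_drop wl a x t hd, drop_succ_of_drop wl a x t hd,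
          List.take_succ_cons, List.findIdx?_cons]
      by_cases hs : PySem.Str.startswith x "*" = true
      · rw [if_pos hs, if_pos hs]
        simp
      · rw [if_neg hs, if_neg hs, Option.map_map]
        congr 1
        funext j
        simp only [Function.comp_apply]
        congr 1
        omega

-- bulletFor starting at index 0: the first '*'-index among all but the last element
theorem bulletFor_zero (wl : List String) (h : 1 ≤ wl.length) :
    bulletFor wl (PySem.List.pyRange 0 ((wl.length : Int) - 1) 1) =
      ((wl.take (wl.length - 1)).findIdx? (fun w => PySem.Str.startswith w "*")).map
        (fun j => ((j : Nat) : Int)) := by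
  have hw := bulletFor_window wl (wl.length - 1) 0
  rw [show (((0 : Nat) : Int)) = (0 : Int) from by simp] at hw
  rw [show ((0 : Int) + ((wl.length - 1 : Nat) : Int)) = ((wl.length : Int) - 1) from by omega] at hw
  rw [List.drop_zero] at hw
  simpa using hw

-- A's bullet_tracker equals len(word_list) iff the window B scans holds no '*'-word
theorem bullet_len_iff (wl : List String) :
    (bullet_tracker wl = (wl.length : Int)) ↔
      ((wl.drop (leadingStars wl)).take (wl.length - 1 - leadingStars wl)).findIdx?
        (fun w => PySem.Str.startswith w "*") = none := by
  induction wl with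
  | nil => simp [bullet_tracker, leadingStars]
  | cons w rest ih =>
    cases rest with
    | nil =>
      have h1 : bullet_tracker [w] = 1 := by
        simp only [bullet_tracker]
        rw [show ((([w] : List String).length : Int) - 1) = 0 from by simp,
            PySem.List.pyRange_one_eq_nil (by omega)]
        rfl
      rw [h1, show ([w] : List String).length - 1 - leadingStars [w] = 0 from by simp]
      simp
    | cons y t =>
      have hlen1 : (w :: y :: t).length - 1 = (y :: t).length := by simp
      have htake : (w :: y :: t).take ((w :: y :: t).length - 1)
          = w :: (y :: t).take ((y :: t).length - 1) := by
        rw [hlen1, show (y :: t).length = ((y :: t).length - 1) + 1 from by simp,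
            List.take_succ_cons]
        simp
      have hwin := bulletFor_zero (w :: y :: t) (by simp)
      rw [htake, List.findIdx?_cons] at hwin
      simp only [bullet_tracker]
      rw [hwin]
      by_cases hs : PySem.Str.startswith w "*" = true
      · rw [if_pos hs]
        have hls : leadingStars (w :: y :: t) = leadingStars (y :: t) + 1 := by
          simp only [leadingStars]; rw [if_pos hs]
        rw [hls,
            show (w :: y :: t).drop (leadingStars (y :: t) + 1)
              = (y :: t).drop (leadingStars (y :: t)) from by simp,
            show (w :: y :: t).length - 1 - (leadingStars (y :: t) + 1)
              = (y :: t).length - 1 - leadingStars (y :: t) from by simp,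
            ← ih]
        show (if ((((0 : Nat) : Int)) == 0) = true then bullet_tracker (y :: t) + 1
              else (((0 : Nat) : Int))) = ((w :: y :: t).length : Int)
            ↔ bullet_tracker (y :: t) = ((y :: t).length : Int)
        rw [if_pos (by simp)]
        simp only [List.length_cons]
        constructor
        · intro h; push_cast at h ⊢; omega
        · intro h; push_cast at h ⊢; omega
      · rw [if_neg hs]
        have hls : leadingStars (w :: y :: t) = 0 := by
          simp only [leadingStars]; rw [if_neg hs]
        rw [hls, List.drop_zero, Nat.sub_zero, htake, List.findIdx?_cons, if_neg hs]
        cases hfi : ((y :: t).take ((y :: t).length - 1)).findIdx?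
            (fun w => PySem.Str.startswith w "*") with
        | none =>
          simp only [Option.map_none]
        | some j =>
          have hj : j < ((y :: t).take ((y :: t).length - 1)).length :=
            (List.findIdx?_eq_some_iff_getElem.mp hfi).1
          have hjlen : j < (y :: t).length - 1 :=
            lt_of_lt_of_le hj (List.length_take_le _ _)
          simp only [Option.map_some]
          show (if ((((j + 1 : Nat) : Int)) == 0) = true then bullet_tracker (y :: t) + 1
                else (((j + 1 : Nat) : Int))) = ((w :: y :: t).length : Int)
              ↔ some (j + 1) = none
          rw [if_neg (by intro hcon; simp at hcon; omega)]
          simp only [List.length_cons]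
          constructor
          · intro h
            exfalso
            push_cast at h
            simp at hjlen ⊢
            omega
          · intro h; exact absurd h (by simp)

-- headerFor over the remaining index range equals tripleScan on the corresponding suffix
theorem headerFor_window (wl : List String) : ∀ (d : List String) (a : Nat), wl.drop a = d →
    headerFor wl (PySem.List.pyRange (a : Int) ((wl.length : Int) - 2) 1) =
      (match tripleScan d (a : Int) with
        | some r => r
        | none => (wl.length : Int)) := by
  intro d
  induction d with
  | nil =>
    intro a hd
    have hlen : wl.length ≤ a := by
      have := List.drop_eq_nil_iff.mp hd; omega
    rw [PySem.List.pyRange_one_eq_nil (by omega)]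
    simp [headerFor, tripleScan]
  | cons x d' ih =>
    intro a hd
    cases d' with
    | nil =>
      have hlen : wl.length = a + 1 := by
        have := congrArg List.length hd
        simp only [List.length_drop, List.length_cons, List.length_nil] at this
        omega
      rw [PySem.List.pyRange_one_eq_nil (by omega)]
      simp [headerFor, tripleScan]
    | cons y d'' =>
      cases d'' with
      | nil =>
        have hlen : wl.length = a + 2 := by
          have := congrArg List.length hd
          simp only [List.length_drop, List.length_cons, List.length_nil] at this
          omega
        rw [PySem.List.pyRange_one_eq_nil (by omega)]
        simp [headerFor, tripleScan]
      | cons z t =>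
        have hlen : a + 3 ≤ wl.length := by
          have := congrArg List.length hd
          simp only [List.length_drop, List.length_cons] at this
          omega
        have hdrop1 : wl.drop (a + 1) = y :: z :: t := drop_succ_of_drop wl a x _ hd
        have hx : PySem.List.pyGetD wl (a : Int) "" = x := pyGetD_of_drop wl a x _ hd
        have hy : PySem.List.pyGetD wl ((a : Int) + 1) "" = y := by
          rw [show ((a : Int) + 1) = ((a + 1 : Nat) : Int) by push_cast; ring]
          exact pyGetD_of_drop wl (a + 1) y _ hdrop1
        have hz : PySem.List.pyGetD wl ((a : Int) + 2) "" = z := by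
          rw [show ((a : Int) + 2) = ((a + 2 : Nat) : Int) by push_cast; ring]
          exact pyGetD_of_drop wl (a + 2) z _ (drop_succ_of_drop wl (a + 1) y _ hdrop1)
        rw [PySem.List.pyRange_one_cons (by omega)]
        simp only [headerFor, hx, hy, hz, word_comparator_eq]
        have hih := ih (a + 1) hdrop1
        rw [show ((a + 1 : Nat) : Int) = (a : Int) + 1 by push_cast; ring] at hih
        show _ = (match tripleScan (x :: y :: z :: t) (a : Int) with
                  | some r => r | none => (wl.length : Int))
        simp only [tripleScan]
        by_cases hc : (!strIslower x && !strIslower y && strIslower z) = true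
        · rw [if_pos hc]
          by_cases hv : validInHeader.contains z = true
          · rw [if_pos hv, hih,
                if_neg (by
                  simp only [Bool.and_eq_true, Bool.not_eq_true', not_and]
                  intro h1
                  rw [hv]; simp)]
          · rw [if_neg hv,
                if_pos (by
                  simp only [Bool.and_eq_true] at hc ⊢
                  exact ⟨hc, by rw [Bool.not_eq_true']; exact eq_false_of_ne_true hv⟩)]
        · rw [if_neg hc, hih,
              if_neg (by
                simp only [Bool.and_eq_true] at hc ⊢
                exact fun h1 => hc h1.1)]

-- ===== VERDICT (by name: the statement is the Claim_ definition above) =====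
theorem header_end_tracker_spec : Claim_equal_header_end_tracker := by
  intro wl _
  unfold Spec_header_end_tracker
  show header_end_tracker wl = header_end_tracker_alt wl
  cases hwl : wl with
  | nil => decide
  | cons w rest =>
    simp only [header_end_tracker, header_end_tracker_alt]
    have hone : 1 ≤ (w :: rest).length := by simp
    have hslice : PySem.List.slice (w :: rest) (some ((leadingStars (w :: rest) : Nat) : Int))
        (some (((w :: rest).length : Int) - 1))
        = ((w :: rest).drop (leadingStars (w :: rest))).take
            ((w :: rest).length - 1 - leadingStars (w :: rest)) := by
      rw [show (((w :: rest).length : Int) - 1) = (((w :: rest).length - 1 : Nat) : Int) by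
            push_cast [hone]; ring]
      rw [PySem.List.slice_natCast]
    rw [hslice]
    have hb := bullet_len_iff (w :: rest)
    have hany : (((w :: rest).drop (leadingStars (w :: rest))).take
          ((w :: rest).length - 1 - leadingStars (w :: rest))).any
          (fun w => PySem.Str.startswith w "*")
        = !(decide (bullet_tracker (w :: rest) = ((w :: rest).length : Int))) := by
      by_cases hbe : bullet_tracker (w :: rest) = ((w :: rest).length : Int)
      · have := hb.mp hbe
        rw [← List.findIdx?_isSome, this]
        simp [hbe]
      · have hnone : ¬ (((w :: rest).drop (leadingStars (w :: rest))).take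
            ((w :: rest).length - 1 - leadingStars (w :: rest))).findIdx?
              (fun w => PySem.Str.startswith w "*") = none := fun h => hbe (hb.mpr h)
        rw [← List.findIdx?_isSome]
        simp only [hbe, decide_false, Bool.not_false]
        cases hfi : (((w :: rest).drop (leadingStars (w :: rest))).take
            ((w :: rest).length - 1 - leadingStars (w :: rest))).findIdx?
              (fun w => PySem.Str.startswith w "*") with
        | none => exact absurd hfi hnone
        | some j => simp
    rw [hany]
    by_cases hbe : bullet_tracker (w :: rest) = ((w :: rest).length : Int)
    · rw [if_neg (by
          simp only [List.length_cons, Nat.cast_add, Nat.cast_one] at hbe ⊢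
          simpa using hbe),
          if_neg (by simp only [decide_eq_true hbe, Bool.not_true]; simp)]
      have := headerFor_window (w :: rest) (w :: rest) 0 (by simp)
      rw [show ((0 : Nat) : Int) = (0 : Int) by simp] at this
      exact this
    · rw [if_pos (by
          simp only [List.length_cons, Nat.cast_add, Nat.cast_one] at hbe ⊢
          simpa using hbe),
          if_pos (by simp only [decide_eq_false hbe, Bool.not_false])]
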